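-- pv_equiv track=rewrite | github.com/OranPie/LegadoPy | legado_engine/utils/content_help.py | _second_last
-- ===== SOURCE A (Python) =====
-- def _second_last(buf: list[str]) -> str:
--     """Return the second-to-last non-whitespace character."""
--     count = 0
--     for chunk in reversed(buf):
--         for ch in reversed(chunk):
--             if not ch.isspace():
--                 count += 1
--                 if count == 2:
--                     return ch
--     return ''
-- ===== SOURCE B (Python) =====
-- def _second_last(buf: list[str]) -> str:
--     """Return the second-to-last non-whitespace character."""
--     nonspace = [c for c in ''.join(buf) if not c.isspace()]
--     return nonspace[-2] if len(nonspace) >= 2 else ''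
-- ===== Notes on version B (the rewrite author's own statement) =====
-- stated objective: simpler
-- what changed: The nested reversed loops with a running counter and early return are replaced by materialising the filtered non-space character list of the joined string and negative-indexing its second-to-last element.
import Mathlib
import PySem

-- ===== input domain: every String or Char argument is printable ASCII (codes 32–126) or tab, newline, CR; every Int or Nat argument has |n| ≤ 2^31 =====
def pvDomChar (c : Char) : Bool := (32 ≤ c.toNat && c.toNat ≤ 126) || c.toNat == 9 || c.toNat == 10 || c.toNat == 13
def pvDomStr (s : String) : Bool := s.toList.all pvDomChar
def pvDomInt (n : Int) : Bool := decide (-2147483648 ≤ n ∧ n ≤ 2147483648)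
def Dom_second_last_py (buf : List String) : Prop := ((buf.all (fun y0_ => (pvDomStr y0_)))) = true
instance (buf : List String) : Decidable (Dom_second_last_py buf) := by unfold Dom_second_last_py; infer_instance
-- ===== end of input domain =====

-- B replaces A's nested reversed loops with running counter by filtering the joined
-- string's non-space characters and indexing the second-to-last one (objective: simpler).

-- ===== PORT A =====
-- inner loop: for ch in reversed(chunk): count, early return on count == 2
def slA_chunk : List Char → Nat → Option Char × Nat
  | [], count => (none, count)
  | c :: cs, count =>
    if !(PySem.Chars.isspace c) then
      if count + 1 == 2 then (some c, count + 1) else slA_chunk cs (count + 1)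
    else slA_chunk cs count

-- outer loop: for chunk in reversed(buf)
def slA_buf : List String → Nat → Option Char
  | [], _ => none
  | s :: rest, count =>
    match slA_chunk s.toList.reverse count with
    | (some c, _) => some c
    | (none, count') => slA_buf rest count'

def second_last_py (buf : List String) : String :=
  match slA_buf buf.reverse 0 with
  | some c => String.mk [c]
  | none => ""

-- ===== PORT B =====
def second_last_py_alt (buf : List String) : String :=
  let nonspace := ((buf.map String.toList).flatten).filter (fun c => !(PySem.Chars.isspace c))
  if 2 ≤ nonspace.length then
    match PySem.List.pyGet? nonspace (-2) with
    | some c => String.mk [c]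
    | none => ""
  else ""

-- ===== PRECONDITION & SPEC =====
def Spec_second_last_py (buf : List String) (out : String) : Prop := out = second_last_py_alt buf
instance (buf : List String) (out : String) : Decidable (Spec_second_last_py buf out) := by unfold Spec_second_last_py; infer_instance

-- ===== CLAIM (what is proved, stated in full; the proofs are below) =====
def Claim_equal_second_last_py : Prop := ∀ (buf : List String), Dom_second_last_py buf → Spec_second_last_py buf (second_last_py buf)

-- ===== LEMMAS AND PROOFS =====

-- the inner loop over an appended list chains its counter state
theorem slA_chunk_append (xs ys : List Char) (n : Nat) :
    slA_chunk (xs ++ ys) n =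
      match slA_chunk xs n with
      | (some c, m) => (some c, m)
      | (none, m) => slA_chunk ys m := by
  induction xs generalizing n with
  | nil => simp [slA_chunk]
  | cons c cs ih =>
    simp only [List.cons_append, slA_chunk]
    split_ifs <;> simp [ih]

-- characterisation of the inner loop by the filtered list, for counter states < 2
theorem slA_chunk_eq (cs : List Char) (n : Nat) (hn : n ≤ 1) :
    slA_chunk cs n =
      (if _h : 2 ≤ (cs.filter (fun c => !(PySem.Chars.isspace c))).length + n
       then ((cs.filter (fun c => !(PySem.Chars.isspace c)))[1 - n]?, 2)
       else (none, n + (cs.filter (fun c => !(PySem.Chars.isspace c))).length)) := by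
  induction cs generalizing n with
  | nil =>
    rw [List.filter_nil, dif_neg (by simp; omega)]
    simp [slA_chunk]
  | cons c cs ih =>
    by_cases hc : PySem.Chars.isspace c
    · have hstep : slA_chunk (c :: cs) n = slA_chunk cs n := by simp [slA_chunk, hc]
      rw [hstep, List.filter_cons_of_neg (by simp [hc])]
      exact ih n hn
    · have hstep : slA_chunk (c :: cs) n =
          if n + 1 == 2 then (some c, n + 1) else slA_chunk cs (n + 1) := by
        simp [slA_chunk, hc]
      rw [hstep, List.filter_cons_of_pos (by simp [hc])]
      interval_cases n
      · rw [if_neg (by decide), ih 1 (by omega)]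
        by_cases h : 2 ≤ (cs.filter (fun x => !(PySem.Chars.isspace x))).length + 1
        · rw [dif_pos h, dif_pos (by simp only [List.length_cons]; omega)]
          simp
        · rw [dif_neg h, dif_neg (by simp only [List.length_cons]; omega)]
          simp [Nat.add_comm]
      · rw [if_pos (by decide), dif_pos (by simp only [List.length_cons]; omega)]
        simp

-- the outer loop equals the inner loop on the flattened character lists
theorem slA_buf_eq_chunk (bs : List String) (n : Nat) :
    slA_buf bs n = (slA_chunk ((bs.map (fun s => s.toList.reverse)).flatten) n).1 := by
  induction bs generalizing n with
  | nil => simp [slA_buf, slA_chunk]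
  | cons s rest ih =>
    simp only [slA_buf, List.map_cons, List.flatten_cons, slA_chunk_append]
    rcases h : slA_chunk s.toList.reverse n with ⟨oc, m⟩
    cases oc <;> simp [ih]

-- ===== VERDICT (by name: the statement is the Claim_ definition above) =====
theorem second_last_py_spec : Claim_equal_second_last_py := by
  intro buf _
  unfold Spec_second_last_py second_last_py second_last_py_alt
  rw [slA_buf_eq_chunk]
  have hflat : (buf.reverse.map (fun s => s.toList.reverse)).flatten
      = ((buf.map String.toList).flatten).reverse := by
    rw [List.reverse_flatten]
    simp [List.map_reverse, Function.comp_def]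
  have hfr : (((buf.map String.toList).flatten).reverse).filter (fun c => !(PySem.Chars.isspace c))
      = (((buf.map String.toList).flatten).filter (fun c => !(PySem.Chars.isspace c))).reverse := by
    simp [List.filter_reverse]
  rw [hflat, slA_chunk_eq _ 0 (by omega), hfr]
  generalize ((buf.map String.toList).flatten).filter (fun c => !(PySem.Chars.isspace c)) = ns
  by_cases h2 : 2 ≤ ns.length
  · rw [dif_pos (by simp only [List.length_reverse, Nat.add_zero]; omega), if_pos h2,
        PySem.List.pyGet?_neg_ofNat ns 2 (by omega) h2,
        List.getElem?_eq_getElem (by simp only [List.length_reverse]; omega),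
        List.getElem?_eq_getElem (by omega)]
    simp only [List.getElem_reverse]
    congr 2
  · rw [dif_neg (by simp only [List.length_reverse, Nat.add_zero]; omega), if_neg h2]
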